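-- pv_equiv track=rewrite | github.com/waerks/Interface3LongExercice | longexercice.py | part_2
-- ===== SOURCE A (Python) =====
-- def part_2(num_lines, num_columns):
--     n = num_lines * num_columns
--
--     tableau_2 = []
--     compteur = 1
--
--     for i in range(num_lines):
--         line = []
--         for ii in range(num_columns):
--             line.append(compteur)
--             compteur += 1
--
--         tableau_2.append(line)
--
--     return tableau_2
-- ===== SOURCE B (Python) =====
-- def part_2(num_lines, num_columns):
--     rows = max(num_lines, 0)
--     cols = max(num_columns, 0)
--     nums = list(range(1, rows * cols + 1))
--     return [nums[i * cols:(i + 1) * cols] for i in range(rows)]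
-- ===== Notes on version B (the rewrite author's own statement) =====
-- stated objective: alternative
-- what changed: Replaces the nested loops threading a running counter with one flat range(1, n+1) buffer that is then partitioned into row-length slices.
import Mathlib
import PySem

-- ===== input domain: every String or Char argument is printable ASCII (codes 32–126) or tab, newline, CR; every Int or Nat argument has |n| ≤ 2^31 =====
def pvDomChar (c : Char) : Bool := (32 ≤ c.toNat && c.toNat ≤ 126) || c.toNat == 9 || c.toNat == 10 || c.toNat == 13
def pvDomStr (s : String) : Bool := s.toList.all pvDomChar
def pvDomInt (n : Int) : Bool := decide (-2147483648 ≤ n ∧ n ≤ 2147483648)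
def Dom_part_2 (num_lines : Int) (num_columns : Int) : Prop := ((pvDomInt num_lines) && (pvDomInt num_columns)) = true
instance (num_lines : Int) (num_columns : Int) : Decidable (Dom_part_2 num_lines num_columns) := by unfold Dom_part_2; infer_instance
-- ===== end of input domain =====

-- B builds one flat 1..n buffer and partitions it into row slices instead of threading a counter through nested loops.

-- ===== PORT A =====
def part_2 (num_lines : Int) (num_columns : Int) : List (List Int) :=
  -- n = num_lines * num_columns is computed but unused by A's loop
  let st := (PySem.List.pyRange 0 num_lines 1).foldl
    (fun (st : List (List Int) × Int) _ =>
      let inner := (PySem.List.pyRange 0 num_columns 1).foldl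
        (fun (p : List Int × Int) _ => (p.1 ++ [p.2], p.2 + 1)) ([], st.2)
      (st.1 ++ [inner.1], inner.2))
    ([], 1)
  st.1

-- ===== PORT B =====
def part_2_alt (num_lines : Int) (num_columns : Int) : List (List Int) :=
  let rows := max num_lines 0
  let cols := max num_columns 0
  let nums := PySem.List.pyRange 1 (rows * cols + 1) 1
  (PySem.List.pyRange 0 rows 1).map
    (fun i => PySem.List.slice nums (some (i * cols)) (some ((i + 1) * cols)))

-- ===== PRECONDITION & SPEC =====
def Spec_part_2 (num_lines : Int) (num_columns : Int) (out : List (List Int)) : Prop := out = part_2_alt num_lines num_columns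
instance (num_lines : Int) (num_columns : Int) (out : List (List Int)) : Decidable (Spec_part_2 num_lines num_columns out) := by unfold Spec_part_2; infer_instance

-- ===== CLAIM (what is proved, stated in full; the proofs are below) =====
def Claim_equal_part_2 : Prop := ∀ (num_lines : Int) (num_columns : Int), Dom_part_2 num_lines num_columns → Spec_part_2 num_lines num_columns (part_2 num_lines num_columns)

-- ===== LEMMAS AND PROOFS =====

-- inner loop of A: appends c, c+1, … for each element of l
theorem pv_inner_fold {α : Type} (l : List α) (acc : List Int) (c : Int) :
    l.foldl (fun (p : List Int × Int) _ => (p.1 ++ [p.2], p.2 + 1)) (acc, c)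
      = (acc ++ List.map (fun j : Nat => c + (j : Int)) (List.range l.length), c + l.length) := by
  induction l generalizing acc c with
  | nil => simp
  | cons x xs ih =>
      simp only [List.foldl_cons, ih, List.length_cons, List.range_succ_eq_map,
        Prod.mk.injEq]
      constructor
      · simp [List.map_map, List.append_assoc]
        intro a _; ring
      · push_cast; ring

-- outer loop of A after the inner loop is resolved
theorem pv_outer_fold {α : Type} (Cn : Nat) (l : List α) (acc : List (List Int)) (c : Int) :
    l.foldl (fun (st : List (List Int) × Int) _ =>
        (st.1 ++ [List.map (fun j : Nat => st.2 + (j : Int)) (List.range Cn)], st.2 + Cn)) (acc, c)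
      = (acc ++ List.map
            (fun i : Nat => List.map (fun j : Nat => c + (i * Cn : Nat) + (j : Int)) (List.range Cn)) (List.range l.length),
         c + l.length * Cn) := by
  induction l generalizing acc c with
  | nil => simp
  | cons x xs ih =>
      simp only [List.foldl_cons, ih, List.length_cons, List.range_succ_eq_map,
        Prod.mk.injEq]
      constructor
      · simp [List.map_map, List.append_assoc]
        intro a _ b _; ring
      · push_cast; ring

-- degenerate outer loop of A (zero or negative column count): each row is [] and the counter is untouched
theorem pv_const_fold {α : Type} (l : List α) (acc : List (List Int)) (c : Int) :
    (l.foldl (fun (x : List (List Int) × Int) _ => (x.1 ++ [([] : List Int)], x.2)) (acc, c)).1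
      = acc ++ List.replicate l.length [] := by
  induction l generalizing acc with
  | nil => simp
  | cons x xs ih => simp [ih, List.replicate_succ, List.append_assoc]

theorem pv_slice_nil {α : Type} (a b : Option Int) : PySem.List.slice ([] : List α) a b = [] := by
  cases a <;> cases b <;> simp [PySem.List.slice]

theorem part_2_spec' (L C : Int) : part_2 L C = part_2_alt L C := by
  unfold part_2 part_2_alt
  dsimp only
  by_cases hL : L ≤ 0
  · have hm : max L 0 = 0 := by omega
    rw [PySem.List.pyRange_one_eq_nil hL, hm,
      PySem.List.pyRange_one_eq_nil (le_refl (0 : Int))]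
    simp
  rw [not_le] at hL
  have hmL : max L 0 = L := by omega
  rw [hmL, PySem.List.pyRange_one (0 : Int) L]
  simp only [zero_add, List.foldl_map, List.map_map]
  by_cases hC : C < 0
  · -- negative column count: every row is empty on both sides
    have hmC : max C 0 = 0 := by omega
    rw [PySem.List.pyRange_one_eq_nil (le_of_lt hC), hmC]
    have hnil : PySem.List.pyRange 1 (L * 0 + 1) 1 = [] := by
      apply PySem.List.pyRange_one_eq_nil
      omega
    rw [hnil]
    simp only [List.foldl_nil]
    rw [pv_const_fold]
    simp [pv_slice_nil, Function.comp_def, List.map_const']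
  rw [not_lt] at hC
  have hmC : max C 0 = C := by omega
  rw [hmC]
  -- C ≥ 0 : both sides equal the canonical row-major matrix
  have hsub : (L - 0).toNat = L.toNat := by simp
  rw [hsub]
  have hrw : ∀ st : List (List Int) × Int,
      (PySem.List.pyRange 0 C 1).foldl
        (fun (p : List Int × Int) _ => (p.1 ++ [p.2], p.2 + 1)) ([], st.2)
      = ((List.range C.toNat).map (fun j : Nat => st.2 + (j : Int)), st.2 + C.toNat) := by
    intro st
    have := pv_inner_fold (PySem.List.pyRange 0 C 1) [] st.2
    simpa [PySem.List.length_pyRange_one, Int.toNat_of_nonneg hC] using this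
  simp only [hrw]
  rw [pv_outer_fold C.toNat (List.range L.toNat) [] 1]
  simp only [List.length_range, List.nil_append]
  -- now compare row by row
  set Ln := L.toNat with hLn
  set Cn := C.toNat with hCn
  have hCeq : (Cn : Int) = C := Int.toNat_of_nonneg hC
  have hLeq : (Ln : Int) = L := Int.toNat_of_nonneg (le_of_lt hL)
  have hlen : (L * C + 1 - 1).toNat = Ln * Cn := by
    simp only [add_sub_cancel_right]
    rw [← hCeq, ← hLeq, ← Nat.cast_mul, Int.toNat_natCast]
  have hnums : PySem.List.pyRange 1 (L * C + 1) 1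
      = List.map (fun m : Nat => 1 + (m : Int)) (List.range (Ln * Cn)) := by
    rw [PySem.List.pyRange_one, hlen]
  rw [hnums]
  refine List.ext_getElem (by simp [hLn]) ?_
  intro k h1 h2
  simp only [List.getElem_map, List.getElem_range, Function.comp]
  have hk : k < Ln := by simpa using h1
  -- reduce B's slice: natural bounds
  have hb1 : ((k : Int) * C) = ((k * Cn : Nat) : Int) := by push_cast [hCeq]; ring
  have hb2 : (((k : Int) + 1) * C) = (((k + 1) * Cn : Nat) : Int) := by push_cast [hCeq]; ring
  rw [hb1, hb2, PySem.List.slice_natCast]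
  have hdt : (k + 1) * Cn - k * Cn = Cn := by
    have : (k + 1) * Cn = k * Cn + Cn := by ring
    omega
  rw [hdt]
  refine List.ext_getElem ?_ ?_
  · simp only [List.length_map, List.length_range, List.length_take, List.length_drop]
    have : (k + 1) * Cn ≤ Ln * Cn := Nat.mul_le_mul_right Cn hk
    have h2 : (k + 1) * Cn = k * Cn + Cn := by ring
    omega
  · intro j hj1 hj2
    have hjC : j < Cn := by simpa using hj1
    have hidx : k * Cn + j < Ln * Cn := by
      have : (k + 1) * Cn ≤ Ln * Cn := Nat.mul_le_mul_right Cn hk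
      have h2 : (k + 1) * Cn = k * Cn + Cn := by ring
      omega
    simp only [← List.map_drop, ← List.map_take, List.getElem_map, List.getElem_range,
      List.getElem_take, List.getElem_drop]
    push_cast; ring

-- ===== VERDICT (by name: the statement is the Claim_ definition above) =====
theorem part_2_spec : Claim_equal_part_2 := by
  intro L C _
  exact part_2_spec' L C
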